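-- pv_equiv track=rewrite | github.com/kodemore/targe | targe/policy.py | normalize_scope
-- ===== SOURCE A (Python) =====
-- from typing import List
--
-- def normalize_scope(scope: str) -> List[str]:
--     if "," not in scope:
--         return [scope.replace(" ", "")]
--
--     scopes: List[str] = []
--     exploded_scope = scope.split(":")
--
--     for section in exploded_scope:
--         if "," in section:
--             exploded_section = section.split(",")
--
--             if not scopes:
--                 scopes = [normalised_section.strip() for normalised_section in exploded_section]
--                 continue
--
--             new_scopes: List[str] = []
--             for ready_scope in scopes:
--                 new_scopes = new_scopes + [
--                     f"{ready_scope}:{normalised_section.strip()}" for normalised_section in exploded_section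
--                 ]
--             scopes = new_scopes
--             continue
--
--         if scopes:
--             scopes = [f"{ready_scope}:{section.strip()}" for ready_scope in scopes]
--             continue
--
--         scopes = [section.strip()]
--
--     return scopes
-- ===== SOURCE B (Python) =====
-- from typing import List
--
--
-- def _product(options: List[List[str]]) -> List[List[str]]:
--     # cartesian product of the option lists, first list most significant
--     if not options:
--         return [[]]
--     rest = _product(options[1:])
--     return [[first] + combo for first in options[0] for combo in rest]
--
--
-- def normalize_scope(scope: str) -> List[str]:
--     if "," not in scope:
--         return [scope.replace(" ", "")]
--
--     options = [[part.strip() for part in section.split(",")] for section in scope.split(":")]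
--     return [":".join(combo) for combo in _product(options)]
-- ===== Notes on version B (the rewrite author's own statement) =====
-- stated objective: simpler
-- what changed: Replaces the interleaved single-pass accumulator (which special-cases empty/non-empty scopes and comma/non-comma sections) with a parse-all-then-combine decomposition: build the table of stripped options per colon section, take its cartesian product recursively, and join each combination with the colon separator.
import Mathlib
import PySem

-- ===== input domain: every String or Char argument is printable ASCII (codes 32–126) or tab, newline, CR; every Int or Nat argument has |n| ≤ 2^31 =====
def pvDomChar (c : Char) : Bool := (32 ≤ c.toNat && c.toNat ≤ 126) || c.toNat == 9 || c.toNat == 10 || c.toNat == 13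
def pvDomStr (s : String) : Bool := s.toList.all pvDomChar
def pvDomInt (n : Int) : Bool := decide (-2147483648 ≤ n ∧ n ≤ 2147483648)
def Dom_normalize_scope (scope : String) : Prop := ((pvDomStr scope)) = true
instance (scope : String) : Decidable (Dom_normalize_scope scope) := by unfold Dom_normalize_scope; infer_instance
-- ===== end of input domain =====

-- B replaces A's interleaved accumulator loop with a parse-all-then-combine decomposition
-- (table of stripped options per section, recursive cartesian product, join) — objective: simpler.


-- ===== PORT A =====
-- s.split(sep) for a non-empty separator (exact: PySem.Chars.splitOn is Python's str.split)
def pySplit (s sep : String) : List String :=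
  (PySem.Chars.splitOn s.toList sep.toList).map String.ofList

-- the body of A's 'for section in exploded_scope' loop, verbatim
def aStep (scopes : List String) (sect : String) : List String :=
  if PySem.Str.isIn "," sect then
    let exploded_section := pySplit sect ","
    if scopes = [] then
      exploded_section.map PySem.Str.strip
    else
      scopes.foldl (fun new_scopes ready_scope =>
        new_scopes ++ exploded_section.map
          (fun p => ready_scope ++ ":" ++ PySem.Str.strip p)) []
  else
    if scopes ≠ [] then
      scopes.map (fun ready_scope => ready_scope ++ ":" ++ PySem.Str.strip sect)
    else
      [PySem.Str.strip sect]

def normalize_scope (scope : String) : List String :=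
  if PySem.Str.isIn "," scope = false then
    [PySem.Str.replace scope " " ""]
  else
    (pySplit scope ":").foldl aStep []

-- ===== PORT B =====
-- Source B's _product: recursive cartesian product, first list most significant
def pvProduct : List (List String) → List (List String)
  | [] => [[]]
  | first :: restOpts =>
    let rest := pvProduct restOpts
    first.flatMap (fun x => rest.map (fun combo => x :: combo))

def normalize_scope_alt (scope : String) : List String :=
  if PySem.Str.isIn "," scope = false then
    [PySem.Str.replace scope " " ""]
  else
    let options := (pySplit scope ":").map
      (fun sect => (pySplit sect ",").map PySem.Str.strip)
    (pvProduct options).map (fun combo => PySem.Str.join ":" combo)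

-- ===== PRECONDITION & SPEC =====
def Spec_normalize_scope (scope : String) (out : List String) : Prop := out = normalize_scope_alt scope
instance (scope : String) (out : List String) : Decidable (Spec_normalize_scope scope out) := by unfold Spec_normalize_scope; infer_instance

-- ===== CLAIM (what is proved, stated in full; the proofs are below) =====
def Claim_equal_normalize_scope : Prop := ∀ (scope : String), Dom_normalize_scope scope → Spec_normalize_scope scope (normalize_scope scope)

-- ===== LEMMAS AND PROOFS =====

-- uniform shape of A's loop body: cartesian step with the stripped comma-parts of the section
def pvStep (scopes opts : List String) : List String :=
  if scopes = [] then opts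
  else scopes.flatMap (fun r => opts.map (fun p => r ++ ":" ++ p))

lemma splitOn_go_no_occ (sep : List Char) (fuel : Nat) :
    ∀ (l cur : List Char) (acc : List (List Char)), ¬ sep <:+: l →
    PySem.Chars.splitOn.go sep fuel l cur acc = ((cur.reverse ++ l) :: acc).reverse := by
  induction fuel with
  | zero => intro l cur acc _; simp [PySem.Chars.splitOn.go]
  | succ n ih =>
    intro l cur acc h
    cases l with
    | nil => simp [PySem.Chars.splitOn.go]
    | cons c rest =>
      have hpre : sep.isPrefixOf (c :: rest) = false := by
        by_contra hq
        exact h ((List.isPrefixOf_iff_prefix.mp (by simpa using hq)).isInfix)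
      have hrest : ¬ sep <:+: rest := fun hi => h (hi.trans (List.suffix_cons c rest).isInfix)
      rw [PySem.Chars.splitOn.go, if_neg (by simp [hpre]), ih rest (c :: cur) acc hrest]
      simp

lemma splitOn_no_occ (s sep : List Char) (h : ¬ sep <:+: s) :
    PySem.Chars.splitOn s sep = [s] := by
  unfold PySem.Chars.splitOn
  simp [splitOn_go_no_occ sep _ s [] [] h]

lemma splitOn_go_ne_nil (sep : List Char) (fuel : Nat) :
    ∀ (l cur : List Char) (acc : List (List Char)),
    PySem.Chars.splitOn.go sep fuel l cur acc ≠ [] := by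
  induction fuel with
  | zero => intro l cur acc; simp [PySem.Chars.splitOn.go]
  | succ n ih =>
    intro l cur acc
    cases l with
    | nil => simp [PySem.Chars.splitOn.go]
    | cons c rest =>
      rw [PySem.Chars.splitOn.go]
      split
      · exact ih _ _ _
      · exact ih _ _ _

lemma pySplit_ne_nil (s sep : String) : pySplit s sep ≠ [] := by
  simp [pySplit, splitOn_go_ne_nil, PySem.Chars.splitOn]

lemma pySplit_no_comma (s : String) (h : PySem.Str.isIn "," s = false) :
    pySplit s "," = [s] := by
  have hni : ¬ ("," : String).toList <:+: s.toList := by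
    simpa using (PySem.Chars.isIn_eq_false_iff _ _).mp (by simpa using h)
  unfold pySplit
  rw [splitOn_no_occ _ _ hni]
  simp [String.ofList_toList]

lemma flatten_map_singleton {α β : Type} (g : α → β) (l : List α) :
    (l.map (fun r => [g r])).flatten = l.map g := by
  induction l with
  | nil => rfl
  | cons a t ih => simp [ih]

lemma aStep_eq_pvStep (scopes : List String) (sect : String) :
    aStep scopes sect = pvStep scopes ((pySplit sect ",").map PySem.Str.strip) := by
  unfold aStep pvStep
  by_cases hc : PySem.Str.isIn "," sect
  · simp only [hc, if_pos]
    by_cases hz : scopes = []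
    · simp [hz]
    · simp [hz, List.flatMap_def, Function.comp_def]
  · simp only [hc, Bool.false_eq_true, if_false]
    rw [pySplit_no_comma sect (by simpa using hc)]
    by_cases hz : scopes = []
    · simp [hz]
    · simp only [hz, ne_eq, not_false_iff, if_true, List.flatMap_def]
      exact (flatten_map_singleton _ scopes).symm

-- join a combination onto an already-built prefix
def joinTo (r : String) (c : List String) : String :=
  c.foldl (fun s p => s ++ ":" ++ p) r

lemma joinTo_append (a b : String) (c : List String) :
    joinTo (a ++ b) c = a ++ joinTo b c := by
  induction c generalizing b with
  | nil => simp [joinTo]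
  | cons y ys ih =>
    simp only [joinTo, List.foldl_cons] at *
    have e1 : (a ++ b) ++ ":" ++ y = a ++ (b ++ ":" ++ y) := by
      simp only [String.append_assoc]
    rw [e1]
    exact ih (b ++ ":" ++ y)

lemma join_cons_eq_joinTo (x : String) (c : List String) :
    PySem.Str.join ":" (x :: c) = joinTo x c := by
  induction c generalizing x with
  | nil => simp [PySem.Str.join, PySem.Chars.join_singleton, joinTo]
  | cons y ys ih =>
    have h : PySem.Str.join ":" (x :: y :: ys) = x ++ ":" ++ PySem.Str.join ":" (y :: ys) := by
      simp only [PySem.Str.join, List.map_cons, PySem.Chars.join_cons_cons,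
        String.ofList_append, String.ofList_toList]
    rw [h, ih y]
    have e2 : joinTo x (y :: ys) = joinTo (x ++ ":" ++ y) ys := rfl
    rw [e2, joinTo_append (x ++ ":") y ys]

lemma pvStep_ne_nil (scopes opts : List String) (h1 : scopes ≠ []) (h2 : opts ≠ []) :
    pvStep scopes opts ≠ [] := by
  unfold pvStep
  rw [if_neg h1]
  obtain ⟨r, hr⟩ := List.exists_mem_of_ne_nil scopes h1
  intro hnil
  rw [List.flatMap_eq_nil_iff] at hnil
  exact h2 (List.map_eq_nil_iff.mp (hnil r hr))

lemma foldl_pvStep (opts : List (List String)) :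
    ∀ (acc : List String), acc ≠ [] → (∀ o ∈ opts, o ≠ []) →
    opts.foldl pvStep acc = acc.flatMap (fun r => (pvProduct opts).map (joinTo r)) := by
  induction opts with
  | nil => intro acc _ _; simp [pvProduct, joinTo]
  | cons o rest ih =>
    intro acc hacc hne
    have ho : o ≠ [] := hne o (by simp)
    have hstep : pvStep acc o ≠ [] := pvStep_ne_nil acc o hacc ho
    simp only [List.foldl_cons]
    rw [ih (pvStep acc o) hstep (fun x hx => hne x (List.mem_cons_of_mem _ hx))]
    show (pvStep acc o).flatMap _ = _
    unfold pvStep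
    rw [if_neg hacc, List.flatMap_assoc]
    simp only [List.flatMap_map, pvProduct, List.map_flatMap, List.map_map,
      Function.comp_def]
    rfl

-- ===== VERDICT (by name: the statement is the Claim_ definition above) =====
theorem normalize_scope_spec : Claim_equal_normalize_scope := by
  intro scope _
  show normalize_scope scope = normalize_scope_alt scope
  unfold normalize_scope normalize_scope_alt
  by_cases h : PySem.Str.isIn "," scope = false
  · rw [if_pos h, if_pos h]
  · rw [if_neg h, if_neg h]
    obtain ⟨s0, rest, hsplit⟩ := List.exists_cons_of_ne_nil (pySplit_ne_nil scope ":")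
    rw [hsplit]
    simp only [List.foldl_cons, List.map_cons]
    have h0 : aStep [] s0 = (pySplit s0 ",").map PySem.Str.strip := by
      rw [aStep_eq_pvStep]; simp [pvStep]
    rw [h0]
    rw [PySem.List.foldl_congr_mem rest aStep
        (fun acc sect => pvStep acc ((pySplit sect ",").map PySem.Str.strip))
        _ (fun acc x _ => aStep_eq_pvStep acc x)]
    rw [show (fun (acc : List String) (sect : String) =>
          pvStep acc ((pySplit sect ",").map PySem.Str.strip)) =
        (fun acc sect => (fun a (o : List String) => pvStep a o) acc
          ((fun sect => (pySplit sect ",").map PySem.Str.strip) sect)) from rfl]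
    rw [← List.foldl_map]
    rw [foldl_pvStep _ _ (by simp [pySplit_ne_nil])
        (by intro o ho; simp only [List.mem_map] at ho; obtain ⟨s, _, rfl⟩ := ho
            simp [pySplit_ne_nil])]
    simp only [pvProduct, List.map_flatMap, List.map_map]
    congr 1
    funext x
    congr 1
    funext c
    exact (join_cons_eq_joinTo x c).symm
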